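-- pv_equiv track=rewrite | github.com/MauriceCalvert/andante | scripts/episode_kernel_demo.py | _contour_label
-- ===== SOURCE A (Python) =====
-- def _contour_label(degrees: tuple[int, ...]) -> str:
--     """Classify kernel contour as ascending/descending/mixed."""
--     if len(degrees) < 2:
--         return "static"
--     ups: int = sum(1 for i in range(len(degrees) - 1) if degrees[i + 1] > degrees[i])
--     downs: int = sum(1 for i in range(len(degrees) - 1) if degrees[i + 1] < degrees[i])
--     if ups > 0 and downs == 0:
--         return "ascending"
--     if downs > 0 and ups == 0:
--         return "descending"
--     return "mixed"
-- ===== SOURCE B (Python) =====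
-- def _contour_label(degrees: tuple[int, ...]) -> str:
--     """Classify kernel contour as ascending/descending/mixed."""
--     if len(degrees) < 2:
--         return "static"
--     seq = list(degrees)
--     inc = seq == sorted(seq)
--     dec = seq == sorted(seq, reverse=True)
--     if inc and not dec:
--         return "ascending"
--     if dec and not inc:
--         return "descending"
--     return "mixed"
-- ===== Notes on version B (the rewrite author's own statement) =====
-- stated objective: alternative
-- what changed: Instead of scanning adjacent pairs and counting ups/downs, B compares the whole sequence against its sorted and reverse-sorted copies: ascending iff it equals sorted(seq) but not sorted(seq, reverse=True) (i.e. monotone non-decreasing and not constant), symmetrically for descending, else mixed.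
import Mathlib
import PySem

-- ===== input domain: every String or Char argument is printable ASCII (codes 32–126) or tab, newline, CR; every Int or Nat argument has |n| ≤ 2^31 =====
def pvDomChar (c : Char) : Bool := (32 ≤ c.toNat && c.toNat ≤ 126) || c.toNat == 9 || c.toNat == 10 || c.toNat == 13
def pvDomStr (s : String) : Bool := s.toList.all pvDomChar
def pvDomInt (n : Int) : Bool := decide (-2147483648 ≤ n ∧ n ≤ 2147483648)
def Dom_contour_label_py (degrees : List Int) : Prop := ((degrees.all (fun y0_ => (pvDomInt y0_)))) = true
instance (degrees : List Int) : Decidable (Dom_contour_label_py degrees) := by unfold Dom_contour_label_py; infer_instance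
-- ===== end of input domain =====

-- B classifies by comparing the sequence with its sorted and reverse-sorted copies
-- (monotone non-decreasing / non-increasing, not constant) instead of A's two
-- index-based up/down counting passes; objective: alternative.


-- ===== PORT A =====
def contour_label_py (degrees : List Int) : String :=
  if degrees.length < 2 then "static"
  else
    let ups : Int := (PySem.List.pyRange 0 ((degrees.length : Int) - 1) 1).foldl
      (fun acc i => if PySem.List.pyGetD degrees (i + 1) 0 > PySem.List.pyGetD degrees i 0 then acc + 1 else acc) 0
    let downs : Int := (PySem.List.pyRange 0 ((degrees.length : Int) - 1) 1).foldl
      (fun acc i => if PySem.List.pyGetD degrees (i + 1) 0 < PySem.List.pyGetD degrees i 0 then acc + 1 else acc) 0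
    if ups > 0 ∧ downs = 0 then "ascending"
    else if downs > 0 ∧ ups = 0 then "descending"
    else "mixed"

-- ===== PORT B =====
def contour_label_py_alt (degrees : List Int) : String :=
  if degrees.length < 2 then "static"
  else
    let inc : Bool := degrees == PySem.List.sorted degrees (fun x => x) false
    let dec : Bool := degrees == PySem.List.sorted degrees (fun x => x) true
    if inc && !dec then "ascending"
    else if dec && !inc then "descending"
    else "mixed"

-- ===== PRECONDITION & SPEC =====
def Spec_contour_label_py (degrees : List Int) (out : String) : Prop := out = contour_label_py_alt degrees
instance (degrees : List Int) (out : String) : Decidable (Spec_contour_label_py degrees out) := by unfold Spec_contour_label_py; infer_instance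

-- ===== CLAIM (what is proved, stated in full; the proofs are below) =====
def Claim_equal_contour_label_py : Prop := ∀ (degrees : List Int), Dom_contour_label_py degrees → Spec_contour_label_py degrees (contour_label_py degrees)

-- ===== LEMMAS AND PROOFS =====

-- A's index-based count over range(len-1) equals a count over the zipped consecutive pairs.
lemma pv_count_pairs (xs : List Int) (g : Int → Int → Bool) :
    (List.range (xs.length - 1)).countP
      (fun k => g (xs.getD (k + 1) 0) (xs.getD k 0))
    = (xs.zip xs.tail).countP (fun p => g p.2 p.1) := by
  induction xs with
  | nil => simp
  | cons x t ih =>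
    cases t with
    | nil => simp
    | cons y r =>
      have h : (x :: y :: r).length - 1 = ((y :: r).length - 1) + 1 := by simp
      rw [h, List.range_succ_eq_map, List.countP_cons, List.countP_map]
      have hfun : ((fun k => g ((x :: y :: r).getD (k + 1) 0) ((x :: y :: r).getD k 0)) ∘ Nat.succ)
          = (fun k => g ((y :: r).getD (k + 1) 0) ((y :: r).getD k 0)) := by
        funext k; simp [Function.comp, List.getD]
      rw [hfun, ih]
      simp [List.getD, List.countP_cons, Nat.add_comm]

-- A's foldl counter over pyRange equals that pair count, as an Int.
lemma pv_foldl_count_pairs (xs : List Int) (g : Int → Int → Bool) :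
    (PySem.List.pyRange 0 ((xs.length : Int) - 1) 1).foldl
      (fun acc i => if g (PySem.List.pyGetD xs (i + 1) 0) (PySem.List.pyGetD xs i 0) then acc + 1 else acc) (0 : Int)
    = (((xs.zip xs.tail).countP (fun p => g p.2 p.1) : Nat) : Int) := by
  rw [PySem.List.pyRange_one, List.foldl_map]
  have h := PySem.List.foldl_count_if
      (fun k : Nat => g (PySem.List.pyGetD xs ((0 + (k : Int)) + 1) 0) (PySem.List.pyGetD xs (0 + (k : Int)) 0))
      (List.range (((xs.length : Int) - 1 - 0).toNat)) 0
  rw [h, zero_add]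
  have hN : (((xs.length : Int) - 1 - 0).toNat) = xs.length - 1 := by omega
  rw [hN, ← pv_count_pairs xs g]
  congr 1
  apply List.countP_congr
  intro k _
  simp only [zero_add]
  rw [show ((k : Int) + 1) = (((k + 1 : Nat)) : Int) from by push_cast; ring,
      PySem.List.pyGetD_natCast, PySem.List.pyGetD_natCast]

-- the two instantiations, stated literally as they appear in the port of A
lemma pv_foldl_gt (xs : List Int) :
    (PySem.List.pyRange 0 ((xs.length : Int) - 1) 1).foldl
      (fun acc i => if PySem.List.pyGetD xs (i + 1) 0 > PySem.List.pyGetD xs i 0 then acc + 1 else acc) (0 : Int)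
    = (((xs.zip xs.tail).countP (fun p => decide (p.2 > p.1)) : Nat) : Int) := by
  have h := pv_foldl_count_pairs xs (fun a b => decide (a > b))
  simp only [decide_eq_true_eq] at h
  exact h

lemma pv_foldl_lt (xs : List Int) :
    (PySem.List.pyRange 0 ((xs.length : Int) - 1) 1).foldl
      (fun acc i => if PySem.List.pyGetD xs (i + 1) 0 < PySem.List.pyGetD xs i 0 then acc + 1 else acc) (0 : Int)
    = (((xs.zip xs.tail).countP (fun p => decide (p.2 < p.1)) : Nat) : Int) := by
  have h := pv_foldl_count_pairs xs (fun a b => decide (a < b))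
  simp only [decide_eq_true_eq] at h
  exact h

-- transitive pairwise order = a property of the zipped consecutive pairs
lemma pv_pairwise_iff_zip (R : Int → Int → Prop) (htr : ∀ a b c, R a b → R b c → R a c) :
    ∀ (xs : List Int), xs.Pairwise R ↔ ∀ p ∈ xs.zip xs.tail, R p.1 p.2
  | [] => by simp
  | [_] => by simp
  | x :: y :: r => by
    rw [List.pairwise_cons]
    have ih := pv_pairwise_iff_zip R htr (y :: r)
    simp only [List.tail_cons, List.zip_cons_cons, List.mem_cons] at *
    constructor
    · rintro ⟨hx, hp⟩ p hp'
      rcases hp' with rfl | hp'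
      · exact hx y (by simp)
      · exact ih.1 hp p hp'
    · intro h
      have hpt : (y :: r).Pairwise R := ih.2 (fun p hp => h p (Or.inr hp))
      refine ⟨?_, hpt⟩
      intro z hz
      have hxy := h (x, y) (Or.inl rfl)
      rcases hz with rfl | hz
      · exact hxy
      · exact htr _ _ _ hxy ((List.pairwise_cons.1 hpt).1 z hz)

-- being equal to one's sorted copy = no adjacent decrease
lemma pv_inc_iff (xs : List Int) :
    (xs == PySem.List.sorted xs (fun x => x) false) = true
      ↔ ∀ p ∈ xs.zip xs.tail, p.1 ≤ p.2 := by
  rw [beq_iff_eq, ← pv_pairwise_iff_zip (fun a b => a ≤ b) (fun _ _ _ => le_trans) xs]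
  constructor
  · intro h
    have hp := PySem.List.sorted_pairwise xs (fun x => x)
    rw [← h] at hp
    exact hp
  · intro h
    exact (PySem.List.sorted_eq_self_of_pairwise xs (fun x => x) h).symm

-- being equal to one's reverse-sorted copy = no adjacent increase
lemma pv_dec_iff (xs : List Int) :
    (xs == PySem.List.sorted xs (fun x => x) true) = true
      ↔ ∀ p ∈ xs.zip xs.tail, p.2 ≤ p.1 := by
  rw [beq_iff_eq, ← pv_pairwise_iff_zip (fun a b => b ≤ a) (fun _ _ _ h1 h2 => le_trans h2 h1) xs]
  constructor
  · intro h
    have hp := PySem.List.sorted_pairwise_rev xs (fun x => x)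
    rw [← h] at hp
    exact hp
  · intro h
    exact (PySem.List.sorted_rev_eq_self_of_pairwise xs (fun x => x) h).symm

-- ===== VERDICT (by name: the statement is the Claim_ definition above) =====
theorem contour_label_py_spec : Claim_equal_contour_label_py := by
  intro degrees _
  unfold Spec_contour_label_py contour_label_py contour_label_py_alt
  by_cases hlen : degrees.length < 2
  · simp [hlen]
  · simp only [hlen, if_false]
    rw [pv_foldl_gt, pv_foldl_lt]
    have hU : ((((degrees.zip degrees.tail).countP (fun p => decide (p.2 > p.1)) : Nat) : Int) = 0)
        ↔ ∀ p ∈ degrees.zip degrees.tail, p.2 ≤ p.1 := by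
      rw [Nat.cast_eq_zero, List.countP_eq_zero]
      simp
    have hD : ((((degrees.zip degrees.tail).countP (fun p => decide (p.2 < p.1)) : Nat) : Int) = 0)
        ↔ ∀ p ∈ degrees.zip degrees.tail, p.1 ≤ p.2 := by
      rw [Nat.cast_eq_zero, List.countP_eq_zero]
      simp
    by_cases hu : ((((degrees.zip degrees.tail).countP (fun p => decide (p.2 > p.1)) : Nat) : Int) = 0)
        <;> by_cases hd : ((((degrees.zip degrees.tail).countP (fun p => decide (p.2 < p.1)) : Nat) : Int) = 0)
    · -- no ups, no downs: constant → mixed on both sides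
      have hinc : (degrees == PySem.List.sorted degrees (fun x => x) false) = true :=
        (pv_inc_iff degrees).2 (hD.1 hd)
      have hdec : (degrees == PySem.List.sorted degrees (fun x => x) true) = true :=
        (pv_dec_iff degrees).2 (hU.1 hu)
      rw [if_neg (by omega), if_neg (by omega)]
      simp [hinc, hdec]
    · -- downs only → descending
      have hdec : (degrees == PySem.List.sorted degrees (fun x => x) true) = true :=
        (pv_dec_iff degrees).2 (hU.1 hu)
      have hninc : ¬ (degrees == PySem.List.sorted degrees (fun x => x) false) = true := by
        rw [pv_inc_iff]; exact fun h => hd (hD.2 h)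
      rw [if_neg (by omega), if_pos (by constructor <;> omega)]
      simp [hdec, hninc]
    · -- ups only → ascending
      have hinc : (degrees == PySem.List.sorted degrees (fun x => x) false) = true :=
        (pv_inc_iff degrees).2 (hD.1 hd)
      have hndec : ¬ (degrees == PySem.List.sorted degrees (fun x => x) true) = true := by
        rw [pv_dec_iff]; exact fun h => hu (hU.2 h)
      rw [if_pos (by constructor <;> omega)]
      simp [hinc, hndec]
    · -- both → mixed on both sides
      have hninc : ¬ (degrees == PySem.List.sorted degrees (fun x => x) false) = true := by
        rw [pv_inc_iff]; exact fun h => hd (hD.2 h)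
      have hndec : ¬ (degrees == PySem.List.sorted degrees (fun x => x) true) = true := by
        rw [pv_dec_iff]; exact fun h => hu (hU.2 h)
      rw [if_neg (by omega), if_neg (by omega)]
      simp [hninc, hndec]
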